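-- pv_equiv track=rewrite | github.com/resdenia/logzio-webdav | helpers/compare_etag.py | compare_file_etag
-- ===== SOURCE A (Python) =====
-- def compare_file_etag(data, current):
--
--     sorted_data = {}
--     for etag in data:
--         if etag == None:
--             continue
--         unique_code = etag[0:3] + "_" + etag.split("-")[1]
--         if not unique_code in sorted_data:
--             sorted_data[unique_code] = []
--             sorted_data[unique_code].append(etag)
--         else:
--             sorted_data[unique_code].append(etag)
--     return sorted_data
-- ===== SOURCE B (Python) =====
-- def _key(e):
--     return e[0:3] + "_" + e.split("-")[1]
--
--
-- def compare_file_etag(data, current):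
--     etags = [e for e in data if e is not None]
--     keys = [_key(e) for e in etags]
--     return {k: [e for e in etags if _key(e) == k] for k in dict.fromkeys(keys)}
-- ===== Notes on version B (the rewrite author's own statement) =====
-- stated objective: idiomatic
-- what changed: Replaces A's single-pass mutable-dict bucketing with a grouping dict comprehension: collect the distinct keys in first-occurrence order via dict.fromkeys, then build each group with one filter pass over the data per key.
import Mathlib
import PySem

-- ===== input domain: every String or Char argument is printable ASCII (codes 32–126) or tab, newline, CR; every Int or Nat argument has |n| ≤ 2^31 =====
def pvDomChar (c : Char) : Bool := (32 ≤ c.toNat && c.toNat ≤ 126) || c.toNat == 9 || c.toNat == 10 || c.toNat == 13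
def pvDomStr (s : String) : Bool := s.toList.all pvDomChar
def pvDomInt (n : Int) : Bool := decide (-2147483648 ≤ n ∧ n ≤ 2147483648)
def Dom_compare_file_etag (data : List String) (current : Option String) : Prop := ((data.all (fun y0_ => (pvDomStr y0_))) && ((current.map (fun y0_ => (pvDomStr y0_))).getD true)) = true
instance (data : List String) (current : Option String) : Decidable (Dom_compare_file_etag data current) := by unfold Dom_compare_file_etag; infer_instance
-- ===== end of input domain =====

-- B replaces A's single-pass dict bucketing by "distinct keys first, then one filter pass of the
-- data per key" (dict.fromkeys + a grouping dict comprehension): an alternative grouping strategy,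
-- not claimed faster. Under the type convention `data : List String` cannot contain Python's None,
-- so A's `if etag == None: continue` branch (and B's None filter) is vacuous and has no Lean counterpart.

-- ===== PORT A =====
-- unique_code = etag[0:3] + "_" + etag.split("-")[1]; none = the IndexError when etag has no "-"
-- (string concatenation done on List Char, exact for Python's + on str)
def pvKeyA (e : String) : Option String :=
  match PySem.List.pyGet? (PySem.Chars.splitOn e.toList ['-']) 1 with
  | none => none
  | some t => some (String.ofList (PySem.Chars.slice e.toList (some 0) (some 3) ++ ['_'] ++ t))

-- the loop body of A (the `none` case is the IndexError, excluded by Pre_)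
def pvStepA (d : PySem.Dict String (List String)) (etag : String) : PySem.Dict String (List String) :=
  match pvKeyA etag with
  | none => d
  | some k =>
    if d.contains k then d.modify k [] (· ++ [etag])
    else (d.insert k []).modify k [] (· ++ [etag])

def compare_file_etag (data : List String) (_current : Option String) : List (String × List String) :=
  (data.foldl pvStepA PySem.Dict.empty).items

-- ===== PORT B =====
-- B's _key helper (same formula, the none = IndexError case excluded by Pre_)
def pvKeyB (e : String) : Option String :=
  match PySem.List.pyGet? (PySem.Chars.splitOn e.toList ['-']) 1 with
  | none => none
  | some t => some (String.ofList (PySem.Chars.slice e.toList (some 0) (some 3) ++ ['_'] ++ t))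

-- dict.fromkeys(keys) = PySem.List.dedup; then one filter pass of data per distinct key
def compare_file_etag_alt (data : List String) (_current : Option String) : List (String × List String) :=
  (PySem.List.dedup (data.map pvKeyB)).filterMap (fun k? =>
    k?.map (fun k => (k, data.filter (fun e => pvKeyB e == some k))))

-- ===== PRECONDITION & SPEC =====
-- Pre_ excludes exactly the inputs where Python A raises IndexError: some etag without "-"
-- (etag.split("-")[1] is then out of range). B raises the same IndexError there.
def Pre_compare_file_etag (data : List String) (current : Option String) : Prop :=
  ∀ e ∈ data, PySem.Str.isIn "-" e = true

instance (data : List String) (current : Option String) : Decidable (Pre_compare_file_etag data current) := by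
  unfold Pre_compare_file_etag; infer_instance

def pvWitness_compare_file_etag : List String × Option String :=
  (["abc-123", "abd-123", "abc-123-x"], none)

def Spec_compare_file_etag (data : List String) (current : Option String) (out : List (String × List String)) : Prop := out = compare_file_etag_alt data current
instance (data : List String) (current : Option String) (out : List (String × List String)) : Decidable (Spec_compare_file_etag data current out) := by unfold Spec_compare_file_etag; infer_instance

-- ===== CLAIM (what is proved, stated in full; the proofs are below) =====
def Claim_equal_compare_file_etag : Prop := ∀ (data : List String) (current : Option String), Dom_compare_file_etag data current → Pre_compare_file_etag data current → Spec_compare_file_etag data current (compare_file_etag data current)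

-- ===== LEMMAS AND PROOFS =====

-- the distinct successful keys of xs, in first-occurrence order
def pvSk (xs : List String) : List String :=
  (PySem.List.dedup (xs.map pvKeyB)).filterMap id

-- the group of a key
def pvGrp (xs : List String) (k : String) : List String :=
  xs.filter (fun e => pvKeyB e == some k)

theorem pvFilterMap_map_eq {α β : Type} (l : List (Option α)) (F : α → β) :
    l.filterMap (fun k? => k?.map F) = (l.filterMap id).map F := by
  induction l with
  | nil => rfl
  | cons h t ih => cases h <;> simp [ih]

theorem pvAlt_eq (data : List String) (c : Option String) :
    compare_file_etag_alt data c = (pvSk data).map (fun k => (k, pvGrp data k)) := by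
  unfold compare_file_etag_alt pvSk pvGrp
  exact pvFilterMap_map_eq _ _

theorem pvMem_sk (xs : List String) (k : String) :
    k ∈ pvSk xs ↔ some k ∈ xs.map pvKeyB := by
  unfold pvSk
  simp [List.mem_filterMap]

theorem pvDedup_append (L : List (Option String)) (x : Option String) :
    PySem.List.dedup (L ++ [x]) = PySem.Set.add (PySem.List.dedup L) x := by
  simp [PySem.List.dedup, PySem.Set.ofList_eq_foldl, List.foldl_append, PySem.Set.add]

theorem pvGrp_append (xs : List String) (e k : String) :
    pvGrp (xs ++ [e]) k = pvGrp xs k ++ (if pvKeyB e == some k then [e] else []) := by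
  simp [pvGrp, List.filter_append, List.filter_cons]

theorem pvSk_append_none (xs : List String) (e : String) (h : pvKeyB e = none) :
    pvSk (xs ++ [e]) = pvSk xs := by
  unfold pvSk
  rw [List.map_append, List.map_singleton, h, pvDedup_append, PySem.Set.add]
  split <;> simp

theorem pvSk_append_mem (xs : List String) (e k0 : String) (h : pvKeyB e = some k0)
    (hm : k0 ∈ pvSk xs) : pvSk (xs ++ [e]) = pvSk xs := by
  unfold pvSk
  rw [List.map_append, List.map_singleton, h, pvDedup_append, PySem.Set.add]
  have : PySem.Set.contains (PySem.List.dedup (xs.map pvKeyB)) (some k0) = true := by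
    simp [PySem.Set.contains]
    simpa [List.mem_map] using (pvMem_sk xs k0).mp hm
  rw [this]
  simp

theorem pvSk_append_new (xs : List String) (e k0 : String) (h : pvKeyB e = some k0)
    (hm : k0 ∉ pvSk xs) : pvSk (xs ++ [e]) = pvSk xs ++ [k0] := by
  unfold pvSk
  rw [List.map_append, List.map_singleton, h, pvDedup_append, PySem.Set.add]
  have : PySem.Set.contains (PySem.List.dedup (xs.map pvKeyB)) (some k0) = false := by
    simp [PySem.Set.contains]
    intro a ha hk
    exact hm ((pvMem_sk xs k0).mpr (by simp [List.mem_map]; exact ⟨a, ha, hk⟩))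
  rw [this]
  simp

theorem pvKeyA_eq : pvKeyA = pvKeyB := rfl

theorem pvStepA_none (d : PySem.Dict String (List String)) (e : String) (h : pvKeyA e = none) :
    pvStepA d e = d := by
  unfold pvStepA; rw [h]

theorem pvStepA_some (d : PySem.Dict String (List String)) (e k : String) (h : pvKeyA e = some k) :
    pvStepA d e = if d.contains k then d.modify k [] (· ++ [e])
      else (d.insert k []).modify k [] (· ++ [e]) := by
  unfold pvStepA; rw [h]

theorem pvFind?_map_pair (ks : List String) (f : String → List String) (k : String) (hk : k ∈ ks) :
    List.find? (fun p => p.1 == k) (ks.map (fun k' => (k', f k'))) = some (k, f k) := by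
  induction ks with
  | nil => simp at hk
  | cons a t ih =>
    by_cases h : a = k
    · subst h; simp
    · have hkt : k ∈ t := by
        cases hk with
        | head => exact absurd rfl h
        | tail _ h' => exact h'
      simp [h, ih hkt]

-- the main invariant: A's dict after the loop, as an items list, is B's grouped list
theorem pvMain (xs : List String) :
    (xs.foldl pvStepA PySem.Dict.empty).items = (pvSk xs).map (fun k => (k, pvGrp xs k)) := by
  induction xs using List.reverseRecOn with
  | nil => rfl
  | append_singleton xs e ih =>
    rw [List.foldl_append, List.foldl_cons, List.foldl_nil]
    set d := xs.foldl pvStepA PySem.Dict.empty with hd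
    have hc : ∀ k, d.contains k = decide (k ∈ pvSk xs) := by
      intro k
      simp [PySem.Dict.contains, ih, List.any_map]
      rw [Bool.eq_iff_iff]
      simp [List.any_eq_true, Function.comp]
    cases hK : pvKeyB e with
    | none =>
      rw [pvStepA_none d e (pvKeyA_eq ▸ hK), pvSk_append_none xs e hK, ih]
      apply List.map_congr_left
      intro k _
      rw [pvGrp_append, hK, show ((none : Option String) == some k) = false from rfl]
      simp
    | some k0 =>
      by_cases hmem : k0 ∈ pvSk xs
      · -- key already present: in-place update
        have hct : d.contains k0 = true := by rw [hc]; simpa using hmem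
        have hget : d.getD k0 [] = pvGrp xs k0 := by
          simp [PySem.Dict.getD, PySem.Dict.get?, ih, pvFind?_map_pair _ _ _ hmem]
        rw [pvStepA_some d e k0 (pvKeyA_eq ▸ hK), if_pos hct]
        show (d.insert k0 (d.getD k0 [] ++ [e])).items = _
        rw [hget]
        have : (d.insert k0 (pvGrp xs k0 ++ [e])).items
            = d.items.map (fun p => if p.1 == k0 then (k0, pvGrp xs k0 ++ [e]) else p) := by
          simp [PySem.Dict.insert, hct]
        rw [this, ih, List.map_map, pvSk_append_mem xs e k0 hK hmem]
        apply List.map_congr_left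
        intro k _
        by_cases hk : k = k0
        · subst hk; simp [pvGrp_append, hK]
        · simp [Function.comp, hk, pvGrp_append, hK, Ne.symm hk]
      · -- new key: appended at the end
        have hcf : d.contains k0 = false := by rw [hc]; simpa using hmem
        rw [pvStepA_some d e k0 (pvKeyA_eq ▸ hK), if_neg (by simp [hcf])]
        show ((d.insert k0 []).insert k0 ((d.insert k0 []).getD k0 [] ++ [e])).items = _
        rw [PySem.Dict.getD_insert_self, PySem.Dict.insert_insert_self]
        have : (d.insert k0 ([] ++ [e])).items = d.items ++ [(k0, [e])] := by
          simp [PySem.Dict.insert, hcf]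
        rw [this, ih, pvSk_append_new xs e k0 hK hmem]
        rw [List.map_append]
        congr 1
        · apply List.map_congr_left
          intro k hk
          have hne : k ≠ k0 := fun h => hmem (h ▸ hk)
          simp [pvGrp_append, hK, Ne.symm hne]
        · simp [pvGrp_append, hK]
          unfold pvGrp
          rw [List.filter_eq_nil_iff.mpr]
          intro a ha
          simp only [beq_iff_eq]
          intro hka
          exact hmem ((pvMem_sk xs k0).mpr (by simp [List.mem_map]; exact ⟨a, ha, hka⟩))

-- ===== VERDICT (by name: the statement is the Claim_ definition above) =====
theorem compare_file_etag_spec : Claim_equal_compare_file_etag := by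
  intro data current _ _
  unfold Spec_compare_file_etag compare_file_etag
  rw [pvAlt_eq, pvMain]
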